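-- pv_equiv track=rewrite | github.com/AlessandroCaula/ProgrammingAlgoAndChallenges | 50_PythonChallenges/Day_45.py | analyse_string
-- ===== SOURCE A (Python) =====
-- import string
--
-- def analyse_string(text):
--     dict_count = {"special character": 0, "words": 0, "total character": 0}
--     for word in text.split(" "):
--         # Increase word count.
--         dict_count["words"] += 1
--         for ch in word:
--             if ch in string.punctuation:
--                 dict_count["special character"] += 1
--             dict_count["total character"] += 1
--     return dict_count
-- ===== SOURCE B (Python) =====
-- import string
--
-- def analyse_string(text):
--     # Three independent closed-form counts instead of a nested loop over split words.
--     return {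
--         "special character": sum(1 for ch in text if ch in string.punctuation),
--         "words": text.count(" ") + 1,
--         "total character": len(text) - text.count(" "),
--     }
-- ===== Notes on version B (the rewrite author's own statement) =====
-- stated objective: simpler
-- what changed: Replaced the nested loop over the split words and the mutated dict by three independent direct counts: words = space count plus one, total = length minus space count, special = one punctuation scan of the whole string.
import Mathlib
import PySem

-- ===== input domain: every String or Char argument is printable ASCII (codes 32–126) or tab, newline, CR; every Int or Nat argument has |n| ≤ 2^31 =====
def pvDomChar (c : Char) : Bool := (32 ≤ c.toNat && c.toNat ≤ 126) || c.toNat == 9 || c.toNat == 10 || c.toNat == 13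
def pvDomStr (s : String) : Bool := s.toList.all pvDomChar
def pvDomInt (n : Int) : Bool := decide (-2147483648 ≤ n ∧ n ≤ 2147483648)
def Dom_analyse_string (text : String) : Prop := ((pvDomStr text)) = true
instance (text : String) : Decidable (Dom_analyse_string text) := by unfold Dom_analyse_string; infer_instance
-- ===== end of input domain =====

-- B replaces A's nested loop over text.split(" ") mutating a dict by three independent direct
-- counts (words = count(' ')+1, total = len-count(' '), special = one punctuation scan): simpler.

-- ===== PORT A =====
-- string.punctuation (exact ASCII constant)
def pvPunct : List Char := "!\"#$%&'()*+,-./:;<=>?@[\\]^_`{|}~".toList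

def analyse_string (text : String) : List (String × Int) :=
  -- dict_count initialised inline; the loop mutates it exactly as A does
  ((PySem.Chars.splitOn text.toList [' ']).foldl
    (fun d word =>
      word.foldl
        (fun d ch =>
          -- 'ch in string.punctuation': single-char substring test, exact
          (if PySem.Chars.isIn [ch] pvPunct then d.modify "special character" 0 (· + 1) else d).modify
            "total character" 0 (· + 1))
        (d.modify "words" 0 (· + 1)))
    (PySem.Dict.ofList [("special character", 0), ("words", 0), ("total character", 0)])).items

-- ===== PORT B =====
def analyse_string_alt (text : String) : List (String × Int) :=
  [("special character", (text.toList.countP (fun ch => PySem.Chars.isIn [ch] pvPunct) : Int)),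
   ("words", (PySem.Str.count text " " : Int) + 1),
   ("total character", (PySem.Str.len text : Int) - (PySem.Str.count text " " : Int))]

-- ===== PRECONDITION & SPEC =====
def Spec_analyse_string (text : String) (out : List (String × Int)) : Prop := out = analyse_string_alt text
instance (text : String) (out : List (String × Int)) : Decidable (Spec_analyse_string text out) := by unfold Spec_analyse_string; infer_instance

-- ===== CLAIM (what is proved, stated in full; the proofs are below) =====
def Claim_equal_analyse_string : Prop := ∀ (text : String), Dom_analyse_string text → Spec_analyse_string text (analyse_string text)

-- ===== LEMMAS AND PROOFS =====

-- Python `s.count(c)` for a single character is List.count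
theorem pv_count_go_single (c : Char) (l : List Char) (fuel acc : Nat) (h : l.length <= fuel) :
    PySem.Chars.count.go [c] fuel l acc = acc + l.count c := by
  induction l generalizing fuel acc with
  | nil => cases fuel <;> simp [PySem.Chars.count.go]
  | cons x t ih =>
    cases fuel with
    | zero => simp at h
    | succ f =>
      have hlen : t.length <= f := by simpa using h
      by_cases hx : c = x
      · have step : PySem.Chars.count.go [c] (f + 1) (x :: t) acc
            = PySem.Chars.count.go [c] f t (acc + 1) := by
          simp [PySem.Chars.count.go, List.isPrefixOf, hx]
        rw [step, ih f (acc + 1) hlen, List.count_cons]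
        simp [hx]
        omega
      · have step : PySem.Chars.count.go [c] (f + 1) (x :: t) acc
            = PySem.Chars.count.go [c] f t acc := by
          simp [PySem.Chars.count.go, List.isPrefixOf, hx]
        rw [step, ih f acc hlen, List.count_cons]
        simp [show ¬x = c from fun h' => hx h'.symm]

theorem pv_count_single (c : Char) (l : List Char) :
    PySem.Chars.count l [c] = l.count c := by
  simp [PySem.Chars.count, pv_count_go_single c l l.length 0 (le_refl _)]

-- reference recursion for text.split(" ") with a single-character separator
def pvSplit : List Char → Char → List (List Char)
  | [], _ => [[]]
  | x :: xs, c =>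
      if x = c then [] :: pvSplit xs c
      else
        match pvSplit xs c with
        | [] => [[x]]
        | w :: ws => (x :: w) :: ws

theorem pvSplit_ne_nil (l : List Char) (c : Char) : pvSplit l c ≠ [] := by
  cases l with
  | nil => simp [pvSplit]
  | cons x xs =>
    simp only [pvSplit]
    split
    · simp
    · split <;> simp

theorem pv_splitOn_go (c : Char) (l : List Char) (fuel : Nat) (cur : List Char)
    (acc : List (List Char)) (h : l.length <= fuel) :
    PySem.Chars.splitOn.go [c] fuel l cur acc
      = acc.reverse ++ (cur.reverse ++ (pvSplit l c).headI) :: (pvSplit l c).tail := by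
  induction l generalizing fuel cur acc with
  | nil => cases fuel <;> simp [PySem.Chars.splitOn.go, pvSplit]
  | cons x t ih =>
    cases fuel with
    | zero => simp at h
    | succ f =>
      have hlen : t.length <= f := by simpa using h
      by_cases hx : x = c
      · subst hx
        have step : PySem.Chars.splitOn.go [x] (f + 1) (x :: t) cur acc
            = PySem.Chars.splitOn.go [x] f t [] (cur.reverse :: acc) := by
          simp [PySem.Chars.splitOn.go, List.isPrefixOf]
        rw [step, ih f [] (cur.reverse :: acc) hlen]
        simp only [pvSplit, if_pos]
        rcases hw : pvSplit t x with _ | ⟨w, ws⟩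
        · exact absurd hw (pvSplit_ne_nil t x)
        · simp
      · have hcx : (c == x) = false := by
          simp [show ¬c = x from fun h' => hx h'.symm]
        have step : PySem.Chars.splitOn.go [c] (f + 1) (x :: t) cur acc
            = PySem.Chars.splitOn.go [c] f t (x :: cur) acc := by
          simp [PySem.Chars.splitOn.go, List.isPrefixOf, hcx]
        rw [step, ih f (x :: cur) acc hlen]
        simp only [pvSplit, if_neg hx]
        rcases hw : pvSplit t c with _ | ⟨w, ws⟩
        · exact absurd hw (pvSplit_ne_nil t c)
        · simp

theorem pv_splitOn_single (l : List Char) (c : Char) :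
    PySem.Chars.splitOn l [c] = pvSplit l c := by
  rw [PySem.Chars.splitOn, pv_splitOn_go c l (l.length + 1) [] [] (by omega)]
  rcases hw : pvSplit l c with _ | ⟨w, ws⟩
  · exact absurd hw (pvSplit_ne_nil l c)
  · simp

theorem pvSplit_length (l : List Char) (c : Char) :
    (pvSplit l c).length = l.count c + 1 := by
  induction l with
  | nil => simp [pvSplit]
  | cons x t ih =>
    by_cases hx : x = c
    · subst hx
      have h1 : pvSplit (x :: t) x = [] :: pvSplit t x := by simp [pvSplit]
      rw [h1, List.length_cons, ih, List.count_cons_self]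
    · rcases hw : pvSplit t c with _ | ⟨w, ws⟩
      · exact absurd hw (pvSplit_ne_nil t c)
      · rw [hw] at ih
        simp only [pvSplit, if_neg hx, hw, List.length_cons, List.count_cons] at ih ⊢
        simp [fun h' : x = c => hx h', ih]

theorem pvSplit_flatten (l : List Char) (c : Char) :
    (pvSplit l c).flatten = l.filter (fun x => !(x = c : Bool)) := by
  induction l with
  | nil => simp [pvSplit]
  | cons x t ih =>
    by_cases hx : x = c
    · subst hx
      have h1 : pvSplit (x :: t) x = [] :: pvSplit t x := by simp [pvSplit]
      rw [h1, List.flatten_cons]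
      simpa using ih
    · rcases hw : pvSplit t c with _ | ⟨w, ws⟩
      · exact absurd hw (pvSplit_ne_nil t c)
      · rw [hw] at ih
        simp only [pvSplit, if_neg hx, hw, List.flatten_cons, List.filter_cons] at ih ⊢
        simp [hx, ih]

-- the dict state A's loop maintains
def pvD (a b c : Int) : PySem.Dict String Int :=
  PySem.Dict.ofList [("special character", a), ("words", b), ("total character", c)]

theorem pvD_special (a b c : Int) : (pvD a b c).modify "special character" 0 (· + 1) = pvD (a + 1) b c := rfl
theorem pvD_words (a b c : Int) : (pvD a b c).modify "words" 0 (· + 1) = pvD a (b + 1) c := rfl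
theorem pvD_total (a b c : Int) : (pvD a b c).modify "total character" 0 (· + 1) = pvD a b (c + 1) := rfl
theorem pvD_items (a b c : Int) :
    (pvD a b c).items = [("special character", a), ("words", b), ("total character", c)] := rfl

theorem pv_inner (w : List Char) (a b c : Int) :
    w.foldl
      (fun d ch =>
        (if PySem.Chars.isIn [ch] pvPunct then d.modify "special character" 0 (· + 1) else d).modify
          "total character" 0 (· + 1))
      (pvD a b c)
    = pvD (a + w.countP (fun ch => PySem.Chars.isIn [ch] pvPunct)) b (c + w.length) := by
  induction w generalizing a c with
  | nil => simp
  | cons ch t ih =>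
    simp only [List.foldl_cons, List.countP_cons, List.length_cons]
    by_cases h : PySem.Chars.isIn [ch] pvPunct = true
    · rw [if_pos h, pvD_special, pvD_total, ih]
      simp only [h, if_pos]
      congr 1 <;> push_cast <;> ring
    · rw [if_neg h, pvD_total, ih]
      have hb : PySem.Chars.isIn [ch] pvPunct = false := by simpa using h
      simp only [hb, Bool.false_eq_true, if_false]
      congr 1 <;> push_cast <;> ring

theorem pv_outer (ws : List (List Char)) (a b c : Int) :
    ws.foldl
      (fun d word =>
        word.foldl
          (fun d ch =>
            (if PySem.Chars.isIn [ch] pvPunct then d.modify "special character" 0 (· + 1) else d).modify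
              "total character" 0 (· + 1))
          (d.modify "words" 0 (· + 1)))
      (pvD a b c)
    = pvD (a + ws.flatten.countP (fun ch => PySem.Chars.isIn [ch] pvPunct)) (b + ws.length)
        (c + ws.flatten.length) := by
  induction ws generalizing a b c with
  | nil => simp
  | cons w rest ih =>
    simp only [List.foldl_cons, pvD_words, pv_inner, ih, List.flatten_cons, List.countP_append,
      List.length_cons, List.length_append]
    congr 1 <;> push_cast <;> ring

theorem pv_punct_ne_space (ch : Char) (h : PySem.Chars.isIn [ch] pvPunct = true) :
    (ch = ' ' : Bool) = false := by
  by_cases hc : ch = ' '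
  · subst hc
    exfalso
    revert h
    decide
  · simpa using hc

theorem pv_filter_countP (l : List Char) :
    (l.filter (fun x => !(x = ' ' : Bool))).countP (fun ch => PySem.Chars.isIn [ch] pvPunct)
      = l.countP (fun ch => PySem.Chars.isIn [ch] pvPunct) := by
  rw [List.countP_filter]
  apply List.countP_congr
  intro ch _
  constructor
  · intro h
    exact Bool.and_elim_left h
  · intro h
    simp [h, pv_punct_ne_space ch h]

theorem pv_filter_length (l : List Char) :
    ((l.filter (fun x => !(x = ' ' : Bool))).length : Int)
      = (l.length : Int) - (l.count ' ' : Int) := by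
  induction l with
  | nil => simp
  | cons x t ih =>
    by_cases hx : x = ' '
    · subst hx
      have h1 : List.filter (fun x => !(x = ' ' : Bool)) (' ' :: t)
          = List.filter (fun x => !(x = ' ' : Bool)) t := by simp
      rw [h1, List.count_cons_self, List.length_cons]
      push_cast at ih ⊢
      omega
    · have hb : (x = ' ' : Bool) = false := by simpa using hx
      have h1 : List.filter (fun x => !(x = ' ' : Bool)) (x :: t)
          = x :: List.filter (fun x => !(x = ' ' : Bool)) t := by simp [hb]
      rw [h1, List.count_cons, List.length_cons, List.length_cons]
      simp only [beq_iff_eq, hx, if_false]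
      push_cast at ih ⊢
      omega

-- ===== VERDICT (by name: the statement is the Claim_ definition above) =====
theorem analyse_string_spec : Claim_equal_analyse_string := by
  intro text _
  unfold Spec_analyse_string analyse_string analyse_string_alt
  rw [pv_splitOn_single,
    show PySem.Dict.ofList
      [("special character", (0:Int)), ("words", 0), ("total character", 0)] = pvD 0 0 0 from rfl,
    pv_outer, pvD_items, pvSplit_flatten, pvSplit_length]
  have hc : PySem.Str.count text " " = text.toList.count ' ' := by
    simp [PySem.Str.count, pv_count_single]
  have hl : (PySem.Str.len text : Int) = (text.toList.length : Int) := by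
    simp [PySem.Str.len]
  simp only [pv_filter_countP, pv_filter_length, hc, hl, List.cons.injEq, Prod.mk.injEq]
  refine ⟨⟨trivial, by omega⟩, ⟨trivial, by push_cast; omega⟩, ⟨trivial, by omega⟩, trivial⟩
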